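-- pv_equiv track=rewrite | github.com/mohamedsemah/a11y-evaluator | backend/report_generator.py | _generate_priority_recommendations
-- ===== SOURCE A (Python) =====
-- from typing import Dict, List, Any, Optional
--
-- def _generate_priority_recommendations(issues: List[Dict[str, Any]]) -> List[str]:
--     """Generate priority recommendations based on issues"""
--     recommendations = []
--
--     # Count severity and categories
--     severity_counts = {'A': 0, 'AA': 0, 'AAA': 0}
--     category_counts = {'perceivable': 0, 'operable': 0, 'understandable': 0, 'robust': 0}
--
--     for issue in issues:
--         severity = issue.get('severity', 'A')
--         category = issue.get('category', 'unknown')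
--
--         if severity in severity_counts:
--             severity_counts[severity] += 1
--         if category in category_counts:
--             category_counts[category] += 1
--
--     # Generate recommendations based on most common issues
--     if severity_counts['A'] > 0:
--         recommendations.append(
--             f"Immediately address {severity_counts['A']} Level A violations - these are critical accessibility barriers")
--
--     if severity_counts['AA'] > 0:
--         recommendations.append(
--             f"Plan remediation for {severity_counts['AA']} Level AA violations to meet standard compliance")
--
--     # Category-specific recommendations
--     max_category = max(category_counts, key=category_counts.get) if any(category_counts.values()) else None
--
--     if max_category == 'perceivable':
--         recommendations.append("Focus on improving visual and sensory accessibility (alt text, contrast, etc.)")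
--     elif max_category == 'operable':
--         recommendations.append("Enhance keyboard navigation and interactive element accessibility")
--     elif max_category == 'understandable':
--         recommendations.append("Improve content clarity and user interface predictability")
--     elif max_category == 'robust':
--         recommendations.append("Strengthen code structure and assistive technology compatibility")
--
--     # If no specific recommendations, add general ones
--     if not recommendations:
--         recommendations.extend([
--             "Implement comprehensive accessibility testing",
--             "Review and update development processes",
--             "Consider accessibility training for development team"
--         ])
--
--     return recommendations[:5]  # Return top 5 recommendations
-- ===== SOURCE B (Python) =====
-- def _generate_priority_recommendations(issues):
--     """Generate priority recommendations based on issues (per-count scans, no mutable counters)."""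
--     n_a = sum(1 for i in issues if i.get('severity', 'A') == 'A')
--     n_aa = sum(1 for i in issues if i.get('severity', 'A') == 'AA')
--     counts = [sum(1 for i in issues if i.get('category', 'unknown') == c)
--               for c in ('perceivable', 'operable', 'understandable', 'robust')]
--
--     recs = []
--     if n_a:
--         recs.append(f"Immediately address {n_a} Level A violations - these are critical accessibility barriers")
--     if n_aa:
--         recs.append(f"Plan remediation for {n_aa} Level AA violations to meet standard compliance")
--     if any(counts):
--         msgs = ["Focus on improving visual and sensory accessibility (alt text, contrast, etc.)",
--                 "Enhance keyboard navigation and interactive element accessibility",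
--                 "Improve content clarity and user interface predictability",
--                 "Strengthen code structure and assistive technology compatibility"]
--         recs.append(msgs[counts.index(max(counts))])
--     if recs:
--         return recs
--     return ["Implement comprehensive accessibility testing",
--             "Review and update development processes",
--             "Consider accessibility training for development team"]
-- ===== Notes on version B (the rewrite author's own statement) =====
-- stated objective: alternative
-- what changed: Replaces the single counting loop over two mutable count dicts and the dict-keyed max() with independent per-key count scans plus a parallel-list max/index selection of the dominant category message; the vacuous [:5] slice is dropped (at most 3 recommendations are ever built).
import Mathlib
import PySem

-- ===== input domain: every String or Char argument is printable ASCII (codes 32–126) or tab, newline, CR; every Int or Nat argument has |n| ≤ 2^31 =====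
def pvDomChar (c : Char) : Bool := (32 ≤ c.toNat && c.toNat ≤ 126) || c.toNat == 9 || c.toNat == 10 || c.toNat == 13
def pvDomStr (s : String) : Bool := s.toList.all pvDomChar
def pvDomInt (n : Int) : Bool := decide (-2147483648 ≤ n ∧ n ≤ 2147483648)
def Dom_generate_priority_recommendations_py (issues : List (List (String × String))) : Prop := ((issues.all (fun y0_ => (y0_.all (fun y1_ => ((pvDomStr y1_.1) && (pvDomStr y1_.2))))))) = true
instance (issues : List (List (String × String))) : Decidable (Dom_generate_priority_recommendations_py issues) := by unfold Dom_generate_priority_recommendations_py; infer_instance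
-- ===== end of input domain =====

-- B replaces A's single counting loop over two mutable count dicts (and its dict-keyed max())
-- by independent per-key count scans and a parallel-list max/first-index pick (objective: alternative decomposition, same cost).

-- ===== PORT A =====
def pvStepA (st : PySem.Dict String Int × PySem.Dict String Int) (issue : List (String × String)) :
    PySem.Dict String Int × PySem.Dict String Int :=
  let d := PySem.Dict.ofList issue
  let severity := d.getD "severity" "A"
  let category := d.getD "category" "unknown"
  let sev := if st.1.contains severity then st.1.modify severity 0 (· + 1) else st.1
  let cat := if st.2.contains category then st.2.modify category 0 (· + 1) else st.2
  (sev, cat)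
def generate_priority_recommendations_py (issues : List (List (String × String))) : List String :=
  let st := issues.foldl pvStepA
    (PySem.Dict.mk [("A", 0), ("AA", 0), ("AAA", 0)],
     PySem.Dict.mk [("perceivable", 0), ("operable", 0), ("understandable", 0), ("robust", 0)])
  let sev := st.1
  let cat := st.2
  let recs : List String := []
  let recs := if sev.getD "A" 0 > 0 then
      recs ++ ["Immediately address " ++ PySem.Int.toStr (sev.getD "A" 0) ++ " Level A violations - these are critical accessibility barriers"]
    else recs
  let recs := if sev.getD "AA" 0 > 0 then
      recs ++ ["Plan remediation for " ++ PySem.Int.toStr (sev.getD "AA" 0) ++ " Level AA violations to meet standard compliance"]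
    else recs
  let maxCat : Option String :=
    if cat.values.any (fun v => v ≠ 0) then
      match cat.keys with
      | [] => none
      | k :: ks => some (ks.foldl (fun best k' => if cat.getD best 0 < cat.getD k' 0 then k' else best) k)
    else none
  let recs := if maxCat = some "perceivable" then
      recs ++ ["Focus on improving visual and sensory accessibility (alt text, contrast, etc.)"]
    else if maxCat = some "operable" then
      recs ++ ["Enhance keyboard navigation and interactive element accessibility"]
    else if maxCat = some "understandable" then
      recs ++ ["Improve content clarity and user interface predictability"]
    else if maxCat = some "robust" then
      recs ++ ["Strengthen code structure and assistive technology compatibility"]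
    else recs
  let recs := if recs = [] then
      ["Implement comprehensive accessibility testing",
       "Review and update development processes",
       "Consider accessibility training for development team"]
    else recs
  PySem.List.slice recs none (some 5)

-- ===== PORT B =====
def generate_priority_recommendations_py_alt (issues : List (List (String × String))) : List String :=
  let nA : Int := issues.countP (fun i => (PySem.Dict.ofList i).getD "severity" "A" == "A")
  let nAA : Int := issues.countP (fun i => (PySem.Dict.ofList i).getD "severity" "A" == "AA")
  let counts : List Int :=
    ["perceivable", "operable", "understandable", "robust"].map
      (fun c => (issues.countP (fun i => (PySem.Dict.ofList i).getD "category" "unknown" == c) : Int))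
  let recs : List String := []
  let recs := if nA ≠ 0 then
      recs ++ ["Immediately address " ++ PySem.Int.toStr nA ++ " Level A violations - these are critical accessibility barriers"]
    else recs
  let recs := if nAA ≠ 0 then
      recs ++ ["Plan remediation for " ++ PySem.Int.toStr nAA ++ " Level AA violations to meet standard compliance"]
    else recs
  let recs := if counts.any (fun v => v ≠ 0) then
      let msgs := ["Focus on improving visual and sensory accessibility (alt text, contrast, etc.)",
                   "Enhance keyboard navigation and interactive element accessibility",
                   "Improve content clarity and user interface predictability",
                   "Strengthen code structure and assistive technology compatibility"]
      match PySem.List.max? counts (fun x => x) with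
      | none => recs
      | some m =>
        match PySem.List.index? counts m with
        | none => recs
        | some j => recs ++ [msgs.getD j ""]
    else recs
  if recs = [] then
    ["Implement comprehensive accessibility testing",
     "Review and update development processes",
     "Consider accessibility training for development team"]
  else recs

-- ===== PRECONDITION & SPEC =====
def Spec_generate_priority_recommendations_py (issues : List (List (String × String))) (out : List String) : Prop := out = generate_priority_recommendations_py_alt issues
instance (issues : List (List (String × String))) (out : List String) : Decidable (Spec_generate_priority_recommendations_py issues out) := by unfold Spec_generate_priority_recommendations_py; infer_instance

-- ===== CLAIM (what is proved, stated in full; the proofs are below) =====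
def Claim_equal_generate_priority_recommendations_py : Prop := ∀ (issues : List (List (String × String))), Dom_generate_priority_recommendations_py issues → Spec_generate_priority_recommendations_py issues (generate_priority_recommendations_py issues)

-- ===== LEMMAS AND PROOFS =====
def pvCntS (issues : List (List (String × String))) (s : String) : Int :=
  issues.countP (fun i => (PySem.Dict.ofList i).getD "severity" "A" == s)
def pvCntC (issues : List (List (String × String))) (s : String) : Int :=
  issues.countP (fun i => (PySem.Dict.ofList i).getD "category" "unknown" == s)

theorem pvSevUpd (a b c : Int) (s : String) :
    (if (PySem.Dict.mk [("A", a), ("AA", b), ("AAA", c)]).contains s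
     then (PySem.Dict.mk [("A", a), ("AA", b), ("AAA", c)]).modify s 0 (· + 1)
     else PySem.Dict.mk [("A", a), ("AA", b), ("AAA", c)]) =
    PySem.Dict.mk [("A", a + if s == "A" then 1 else 0),
                   ("AA", b + if s == "AA" then 1 else 0),
                   ("AAA", c + if s == "AAA" then 1 else 0)] := by
  by_cases h1 : s = "A" <;> by_cases h2 : s = "AA" <;> by_cases h3 : s = "AAA" <;>
    simp_all [PySem.Dict.contains_mk, PySem.Dict.modify, PySem.Dict.insert,
      PySem.Dict.get?, PySem.Dict.getD, Ne.symm]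

theorem pvCatUpd (p o u r : Int) (t : String) :
    (if (PySem.Dict.mk [("perceivable", p), ("operable", o), ("understandable", u), ("robust", r)]).contains t
     then (PySem.Dict.mk [("perceivable", p), ("operable", o), ("understandable", u), ("robust", r)]).modify t 0 (· + 1)
     else PySem.Dict.mk [("perceivable", p), ("operable", o), ("understandable", u), ("robust", r)]) =
    PySem.Dict.mk [("perceivable", p + if t == "perceivable" then 1 else 0),
                   ("operable", o + if t == "operable" then 1 else 0),
                   ("understandable", u + if t == "understandable" then 1 else 0),
                   ("robust", r + if t == "robust" then 1 else 0)] := by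
  by_cases h1 : t = "perceivable" <;> by_cases h2 : t = "operable" <;>
    by_cases h3 : t = "understandable" <;> by_cases h4 : t = "robust" <;>
    simp_all [PySem.Dict.contains_mk, PySem.Dict.modify, PySem.Dict.insert,
      PySem.Dict.get?, PySem.Dict.getD, Ne.symm]

theorem pvStepA_eval (a b c p o u r : Int) (x : List (String × String)) :
    pvStepA (PySem.Dict.mk [("A", a), ("AA", b), ("AAA", c)],
             PySem.Dict.mk [("perceivable", p), ("operable", o), ("understandable", u), ("robust", r)]) x =
    (PySem.Dict.mk [("A", a + if (PySem.Dict.ofList x).getD "severity" "A" == "A" then 1 else 0),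
                    ("AA", b + if (PySem.Dict.ofList x).getD "severity" "A" == "AA" then 1 else 0),
                    ("AAA", c + if (PySem.Dict.ofList x).getD "severity" "A" == "AAA" then 1 else 0)],
     PySem.Dict.mk [("perceivable", p + if (PySem.Dict.ofList x).getD "category" "unknown" == "perceivable" then 1 else 0),
                    ("operable", o + if (PySem.Dict.ofList x).getD "category" "unknown" == "operable" then 1 else 0),
                    ("understandable", u + if (PySem.Dict.ofList x).getD "category" "unknown" == "understandable" then 1 else 0),
                    ("robust", r + if (PySem.Dict.ofList x).getD "category" "unknown" == "robust" then 1 else 0)]) := by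
  show (_, _) = _
  rw [Prod.mk.injEq]
  exact ⟨pvSevUpd a b c _, pvCatUpd p o u r _⟩

theorem pvFoldA (issues : List (List (String × String))) :
    ∀ (a b c p o u r : Int),
    issues.foldl pvStepA
      (PySem.Dict.mk [("A", a), ("AA", b), ("AAA", c)],
       PySem.Dict.mk [("perceivable", p), ("operable", o), ("understandable", u), ("robust", r)]) =
    (PySem.Dict.mk [("A", a + pvCntS issues "A"), ("AA", b + pvCntS issues "AA"), ("AAA", c + pvCntS issues "AAA")],
     PySem.Dict.mk [("perceivable", p + pvCntC issues "perceivable"), ("operable", o + pvCntC issues "operable"),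
       ("understandable", u + pvCntC issues "understandable"), ("robust", r + pvCntC issues "robust")]) := by
  induction issues with
  | nil => intro a b c p o u r; simp [pvCntS, pvCntC]
  | cons x l ih =>
    intro a b c p o u r
    rw [List.foldl_cons, pvStepA_eval, ih]
    simp only [pvCntS, pvCntC, List.countP_cons, Prod.mk.injEq, PySem.Dict.mk.injEq,
      List.cons.injEq, Prod.mk.injEq, and_true, true_and]
    push_cast
    refine ⟨⟨?_, ?_, ?_⟩, ?_, ?_, ?_, ?_⟩ <;> split_ifs <;> ring

def pvBest (k1 k2 k3 k4 : Int) : String :=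
  if k1 < k2 then
    (if k2 < k3 then (if k3 < k4 then "robust" else "understandable")
     else (if k2 < k4 then "robust" else "operable"))
  else
    (if k1 < k3 then (if k3 < k4 then "robust" else "understandable")
     else (if k1 < k4 then "robust" else "perceivable"))

def pvIdx (k1 k2 k3 k4 : Int) : Nat :=
  if k1 < k2 then
    (if k2 < k3 then (if k3 < k4 then 3 else 2) else (if k2 < k4 then 3 else 1))
  else
    (if k1 < k3 then (if k3 < k4 then 3 else 2) else (if k1 < k4 then 3 else 0))

theorem pvFoldMax (k1 k2 k3 k4 : Int) :
    List.foldl (fun best k' =>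
        if (PySem.Dict.mk [("perceivable", k1), ("operable", k2), ("understandable", k3), ("robust", k4)]).getD best 0 <
           (PySem.Dict.mk [("perceivable", k1), ("operable", k2), ("understandable", k3), ("robust", k4)]).getD k' 0
        then k' else best)
      "perceivable" ["operable", "understandable", "robust"] = pvBest k1 k2 k3 k4 := by
  simp only [List.foldl_cons, List.foldl_nil, pvBest]
  by_cases h1 : k1 < k2 <;> simp [PySem.Dict.getD, PySem.Dict.get?, h1]
  · by_cases h2 : k2 < k3 <;> simp [PySem.Dict.getD, PySem.Dict.get?, h2]
  · by_cases h2 : k1 < k3 <;> simp [PySem.Dict.getD, PySem.Dict.get?, h2]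

theorem pvSlice5 (xs : List String) : PySem.List.slice xs none (some 5) = xs.take 5 := by
  simp [pysem]

theorem pvMaxEq (k1 k2 k3 k4 : Int) :
    PySem.List.max? [k1, k2, k3, k4] (fun x => x) = some (max (max (max k1 k2) k3) k4) := by
  rw [PySem.List.max?_id_cons]
  simp [List.foldl]

theorem pvIdxEq (k1 k2 k3 k4 : Int) :
    PySem.List.index? [k1, k2, k3, k4] (max (max (max k1 k2) k3) k4) = some (pvIdx k1 k2 k3 k4) := by
  by_cases h1 : k1 < k2
  · by_cases h2 : k2 < k3
    · by_cases h3 : k3 < k4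
      rw [show max (max (max k1 k2) k3) k4 = k4 from by omega]
      have e1 : k1 ≠ k4 := by omega
      have e2 : k2 ≠ k4 := by omega
      have e3 : k3 ≠ k4 := by omega
      rw [PySem.List.index?_cons_of_ne _ e1, PySem.List.index?_cons_of_ne _ e2, PySem.List.index?_cons_of_ne _ e3, PySem.List.index?_cons_self]
      simp [pvIdx, h1, h2, h3]

      rw [show max (max (max k1 k2) k3) k4 = k3 from by omega]
      have e1 : k1 ≠ k3 := by omega
      have e2 : k2 ≠ k3 := by omega
      rw [PySem.List.index?_cons_of_ne _ e1, PySem.List.index?_cons_of_ne _ e2, PySem.List.index?_cons_self]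
      simp [pvIdx, h1, h2, h3]

    · by_cases h3 : k2 < k4
      rw [show max (max (max k1 k2) k3) k4 = k4 from by omega]
      have e1 : k1 ≠ k4 := by omega
      have e2 : k2 ≠ k4 := by omega
      have e3 : k3 ≠ k4 := by omega
      rw [PySem.List.index?_cons_of_ne _ e1, PySem.List.index?_cons_of_ne _ e2, PySem.List.index?_cons_of_ne _ e3, PySem.List.index?_cons_self]
      simp [pvIdx, h1, h2, h3]

      rw [show max (max (max k1 k2) k3) k4 = k2 from by omega]
      have e1 : k1 ≠ k2 := by omega
      rw [PySem.List.index?_cons_of_ne _ e1, PySem.List.index?_cons_self]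
      simp [pvIdx, h1, h2, h3]

  · by_cases h2 : k1 < k3
    · by_cases h3 : k3 < k4
      rw [show max (max (max k1 k2) k3) k4 = k4 from by omega]
      have e1 : k1 ≠ k4 := by omega
      have e2 : k2 ≠ k4 := by omega
      have e3 : k3 ≠ k4 := by omega
      rw [PySem.List.index?_cons_of_ne _ e1, PySem.List.index?_cons_of_ne _ e2, PySem.List.index?_cons_of_ne _ e3, PySem.List.index?_cons_self]
      simp [pvIdx, h1, h2, h3]

      rw [show max (max (max k1 k2) k3) k4 = k3 from by omega]
      have e1 : k1 ≠ k3 := by omega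
      have e2 : k2 ≠ k3 := by omega
      rw [PySem.List.index?_cons_of_ne _ e1, PySem.List.index?_cons_of_ne _ e2, PySem.List.index?_cons_self]
      simp [pvIdx, h1, h2, h3]

    · by_cases h3 : k1 < k4
      rw [show max (max (max k1 k2) k3) k4 = k4 from by omega]
      have e1 : k1 ≠ k4 := by omega
      have e2 : k2 ≠ k4 := by omega
      have e3 : k3 ≠ k4 := by omega
      rw [PySem.List.index?_cons_of_ne _ e1, PySem.List.index?_cons_of_ne _ e2, PySem.List.index?_cons_of_ne _ e3, PySem.List.index?_cons_self]
      simp [pvIdx, h1, h2, h3]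

      rw [show max (max (max k1 k2) k3) k4 = k1 from by omega]

      rw [PySem.List.index?_cons_self]
      simp [pvIdx, h1, h2, h3]


set_option maxHeartbeats 2000000 in
theorem pv_main (issues : List (List (String × String))) :
    generate_priority_recommendations_py issues = generate_priority_recommendations_py_alt issues := by
  unfold generate_priority_recommendations_py generate_priority_recommendations_py_alt
  rw [pvFoldA]
  simp only [pvCntS, pvCntC, zero_add, List.map_cons, List.map_nil]
  generalize issues.countP (fun i => (PySem.Dict.ofList i).getD "severity" "A" == "A") = n1
  generalize issues.countP (fun i => (PySem.Dict.ofList i).getD "severity" "A" == "AA") = n2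
  generalize issues.countP (fun i => (PySem.Dict.ofList i).getD "severity" "A" == "AAA") = n3
  generalize issues.countP (fun i => (PySem.Dict.ofList i).getD "category" "unknown" == "perceivable") = k1
  generalize issues.countP (fun i => (PySem.Dict.ofList i).getD "category" "unknown" == "operable") = k2
  generalize issues.countP (fun i => (PySem.Dict.ofList i).getD "category" "unknown" == "understandable") = k3
  generalize issues.countP (fun i => (PySem.Dict.ofList i).getD "category" "unknown" == "robust") = k4
  simp only [PySem.Dict.keys_mk, List.map_cons, List.map_nil]
  rw [pvFoldMax, pvMaxEq]
  simp only []
  rw [pvIdxEq]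
  simp only [PySem.Dict.values_mk, PySem.Dict.getD, PySem.Dict.get?, List.find?, List.map_cons,
    List.map_nil, List.any_cons, List.any_nil, Option.map_some, Option.getD_some,
    beq_self_eq_true, String.reduceBEq, Bool.or_false]
  simp only [show ∀ n : ℕ, (((0:ℤ) < ↑n) ↔ ¬((n:ℤ) = 0)) from fun n => by omega]
  generalize hpre : (if ¬((n2:ℤ) = 0) then (if ¬((n1:ℤ) = 0) then ([] : List String) ++ ["Immediately address " ++ PySem.Int.toStr (n1:ℤ) ++ " Level A violations - these are critical accessibility barriers"] else []) ++ ["Plan remediation for " ++ PySem.Int.toStr (n2:ℤ) ++ " Level AA violations to meet standard compliance"] else (if ¬((n1:ℤ) = 0) then ([] : List String) ++ ["Immediately address " ++ PySem.Int.toStr (n1:ℤ) ++ " Level A violations - these are critical accessibility barriers"] else [])) = pre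
  have hlen : pre.length ≤ 2 := by rw [← hpre]; split_ifs <;> simp
  clear hpre
  have htake0 : List.take 5 pre = pre := List.take_of_length_le (by omega)
  have htake : ∀ x : String, List.take 5 (pre ++ [x]) = pre ++ [x] := fun x =>
    List.take_of_length_le (by simp; omega)
  rw [pvSlice5]
  by_cases hany : (decide ((k1:ℤ) ≠ 0) || (decide ((k2:ℤ) ≠ 0) || (decide ((k3:ℤ) ≠ 0) || decide ((k4:ℤ) ≠ 0)))) = true
  case neg =>
    simp only [Bool.not_eq_true] at hany
    simp only [hany, Bool.false_eq_true, if_false]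
    by_cases hpre : pre = [] <;> simp [hpre, htake0]
  case pos =>
    simp only [hany, if_true]
    simp only [pvBest, pvIdx]
    by_cases hb1 : ((k1:ℕ):ℤ) < ↑k2
    · simp only [hb1, if_true]
      by_cases hb2 : ((k2:ℕ):ℤ) < ↑k3
      · simp only [hb2, if_true]
        by_cases hb3 : ((k3:ℕ):ℤ) < ↑k4 <;> simp [hb1, hb2, hb3, htake]
      · simp only [hb2, if_false]
        by_cases hb3 : ((k2:ℕ):ℤ) < ↑k4 <;> simp [hb1, hb2, hb3, htake]
    · simp only [hb1, if_false]
      by_cases hb2 : ((k1:ℕ):ℤ) < ↑k3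
      · simp only [hb2, if_true]
        by_cases hb3 : ((k3:ℕ):ℤ) < ↑k4 <;> simp [hb1, hb2, hb3, htake]
      · simp only [hb2, if_false]
        by_cases hb3 : ((k1:ℕ):ℤ) < ↑k4 <;> simp [hb1, hb2, hb3, htake]

-- ===== VERDICT (by name: the statement is the Claim_ definition above) =====
theorem generate_priority_recommendations_py_spec : Claim_equal_generate_priority_recommendations_py := by
  intro issues _
  unfold Spec_generate_priority_recommendations_py
  exact pv_main issues
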